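-- pv_equiv track=rewrite | github.com/UNCG-CSE/Bat_Echolocation | src/util/bat.py | get_dy_dy2
-- ===== SOURCE A (Python) =====
-- def get_dy_dy2(pulses):
--     pulse_dy=[]
--     pulse_dy2=[]
--     for pulse in pulses:
--         i=0
--         dy=[]
--         dy2=[]
--         for dot in pulse:
--             if i==0:
--                 prev_y=dot[1]
--             elif i==1:
--                 prev_dy=dot[1]-prev_y
--                 dy.append(prev_dy)
--                 prev_y=dot[1]
--             else:
--                 cur_dy=dot[1]-prev_y
--                 dy.append(cur_dy)
--                 dy2.append(cur_dy-prev_dy)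
--                 prev_y=dot[1]
--                 prev_dy=cur_dy
--
--             i+=1
--
--         pulse_dy.append(dy)
--         pulse_dy2.append(dy2)
--     return pulse_dy,pulse_dy2
-- ===== SOURCE B (Python) =====
-- def get_dy_dy2(pulses):
--     def diff(xs):
--         return [b - a for a, b in zip(xs, xs[1:])]
--     dys = [diff([dot[1] for dot in pulse]) for pulse in pulses]
--     return dys, [diff(dy) for dy in dys]
-- ===== Notes on version B (the rewrite author's own statement) =====
-- stated objective: simpler
-- what changed: Replaces the fused stateful inner loop (index counter i, prev_y/prev_dy registers, three branches) by an extract-then-difference decomposition: extract y-values, take pairwise differences via zip, and obtain dy2 by applying the same diff to dy; the outer accumulation loop becomes two comprehensions over the list of dys.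
import Mathlib
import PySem

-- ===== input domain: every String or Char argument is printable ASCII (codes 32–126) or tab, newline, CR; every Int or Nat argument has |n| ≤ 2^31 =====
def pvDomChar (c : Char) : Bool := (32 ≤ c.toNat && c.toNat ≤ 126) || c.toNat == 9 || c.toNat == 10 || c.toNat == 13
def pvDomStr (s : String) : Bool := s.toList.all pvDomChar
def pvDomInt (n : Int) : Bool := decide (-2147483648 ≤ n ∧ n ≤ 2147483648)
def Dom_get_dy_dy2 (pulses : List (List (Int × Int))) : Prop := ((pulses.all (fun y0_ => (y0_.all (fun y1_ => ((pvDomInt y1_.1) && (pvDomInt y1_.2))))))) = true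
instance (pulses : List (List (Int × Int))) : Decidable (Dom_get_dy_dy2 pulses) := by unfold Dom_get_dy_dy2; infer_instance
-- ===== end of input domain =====

-- B replaces A's fused stateful inner loop (index counter, prev_y/prev_dy registers)
-- by an extract-then-difference decomposition (map snd, then pairwise diff twice): simpler.


-- ===== PORT A =====
-- inner 'for dot in pulse' loop of A; state: i, prev_y, prev_dy (0 until first written,
-- exactly as Python's unbound locals are never read before being written), dy, dy2
def pvInnerA : List (Int × Int) → Int → Int → Int → List Int → List Int → List Int × List Int
  | [], _, _, _, dy, dy2 => (dy, dy2)
  | dot :: rest, i, prev_y, prev_dy, dy, dy2 =>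
    if i = 0 then
      pvInnerA rest (i + 1) dot.2 prev_dy dy dy2
    else if i = 1 then
      let prev_dy' := dot.2 - prev_y
      pvInnerA rest (i + 1) dot.2 prev_dy' (dy ++ [prev_dy']) dy2
    else
      let cur_dy := dot.2 - prev_y
      pvInnerA rest (i + 1) dot.2 cur_dy (dy ++ [cur_dy]) (dy2 ++ [cur_dy - prev_dy])

def get_dy_dy2 (pulses : List (List (Int × Int))) : List (List Int) × List (List Int) :=
  pulses.foldl
    (fun acc pulse =>
      let r := pvInnerA pulse 0 0 0 [] []
      (acc.1 ++ [r.1], acc.2 ++ [r.2]))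
    ([], [])

-- ===== PORT B =====
-- diff(xs) = [b - a for a, b in zip(xs, xs[1:])]
def pvDiff (xs : List Int) : List Int := List.zipWith (fun a b => b - a) xs xs.tail

def get_dy_dy2_alt (pulses : List (List (Int × Int))) : List (List Int) × List (List Int) :=
  let dys := pulses.map (fun pulse => pvDiff (pulse.map (fun dot => dot.2)))
  (dys, dys.map pvDiff)

-- ===== PRECONDITION & SPEC =====
def Spec_get_dy_dy2 (pulses : List (List (Int × Int))) (out : List (List Int) × List (List Int)) : Prop := out = get_dy_dy2_alt pulses
instance (pulses : List (List (Int × Int))) (out : List (List Int) × List (List Int)) : Decidable (Spec_get_dy_dy2 pulses out) := by unfold Spec_get_dy_dy2; infer_instance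

-- ===== CLAIM (what is proved, stated in full; the proofs are below) =====
def Claim_equal_get_dy_dy2 : Prop := ∀ (pulses : List (List (Int × Int))), Dom_get_dy_dy2 pulses → Spec_get_dy_dy2 pulses (get_dy_dy2 pulses)

-- ===== LEMMAS AND PROOFS =====

-- In the steady state (i ≥ 2), A's inner loop appends the pairwise differences of
-- prev_y :: ys to dy and the differences of prev_dy :: those to dy2.
lemma pvInnerA_main (dots : List (Int × Int)) :
    ∀ (i prev_y prev_dy : Int) (dy dy2 : List Int), 2 ≤ i →
      pvInnerA dots i prev_y prev_dy dy dy2 =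
        (dy ++ pvDiff (prev_y :: dots.map (fun d => d.2)),
         dy2 ++ pvDiff (prev_dy :: pvDiff (prev_y :: dots.map (fun d => d.2)))) := by
  induction dots with
  | nil => intro i py pd dy dy2 _; simp [pvInnerA, pvDiff]
  | cons d rest ih =>
    intro i py pd dy dy2 hi
    have h0 : ¬ i = 0 := by omega
    have h1 : ¬ i = 1 := by omega
    rw [pvInnerA]
    simp only [h0, h1, if_false]
    rw [ih (i + 1) d.2 (d.2 - py) _ _ (by omega)]
    simp [pvDiff]

lemma pvInnerA_eq (pulse : List (Int × Int)) :
    pvInnerA pulse 0 0 0 [] [] =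
      (pvDiff (pulse.map (fun d => d.2)), pvDiff (pvDiff (pulse.map (fun d => d.2)))) := by
  match pulse with
  | [] => simp [pvInnerA, pvDiff]
  | [d] => simp [pvInnerA, pvDiff]
  | d1 :: d2 :: rest =>
    rw [pvInnerA]
    rw [pvInnerA]
    norm_num
    rw [pvInnerA_main rest 2 d2.2 (d2.2 - d1.2) _ _ (le_refl 2)]
    simp [pvDiff]

lemma foldl_eq (pulses : List (List (Int × Int))) :
    ∀ (a b : List (List Int)),
      pulses.foldl
        (fun acc pulse =>
          let r := pvInnerA pulse 0 0 0 [] []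
          (acc.1 ++ [r.1], acc.2 ++ [r.2])) (a, b) =
      (a ++ pulses.map (fun p => pvDiff (p.map (fun d => d.2))),
       b ++ pulses.map (fun p => pvDiff (pvDiff (p.map (fun d => d.2))))) := by
  induction pulses with
  | nil => intro a b; simp
  | cons p rest ih =>
    intro a b
    rw [List.foldl_cons]
    exact (ih _ _).trans (by simp [pvInnerA_eq])

-- ===== VERDICT (by name: the statement is the Claim_ definition above) =====
theorem get_dy_dy2_spec : Claim_equal_get_dy_dy2 := by
  intro pulses _
  unfold Spec_get_dy_dy2 get_dy_dy2 get_dy_dy2_alt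
  rw [foldl_eq]
  simp [List.map_map, Function.comp]
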